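-- pv_equiv track=rewrite | github.com/LeeJin0527/Algorithm2023 | 프로그래머스/lv2/42860. 조이스틱/조이스틱.py | solution
-- ===== SOURCE A (Python) =====
-- def solution(name):
--     answer = 0
--     for alpha in name:
--         check = min(ord(alpha) - ord('A'), ord('Z') + 1 - ord(alpha))
--         answer += check
--     minValue = int(1e9)
--     for index, value in enumerate(name):
--         check = index + 1
--         while check < len(name) and name[check] == 'A':
--             check += 1
--
--         first = index * 2 + len(name) - check
--         second = index + 2 * (len(name) - check)
--         temp = min(first, second)
--         minValue = min(temp, minValue)
--     answer += minValue
--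
--     return answer
-- ===== SOURCE B (Python) =====
-- def solution(name):
--     n = len(name)
--     answer = sum(min(ord(c) - ord('A'), ord('Z') + 1 - ord(c)) for c in name)
--     # nxt[i] = smallest j >= i+1 with name[j] != 'A', else n (one backward pass)
--     nxt = [0] * n
--     run = n
--     for i in range(n - 1, -1, -1):
--         nxt[i] = run
--         if name[i] != 'A':
--             run = i
--     minValue = 10 ** 9
--     for i, c in enumerate(nxt):
--         minValue = min(minValue, 2 * i + n - c, i + 2 * (n - c))
--     return answer + minValue
-- ===== Notes on version B (the rewrite author's own statement) =====
-- stated objective: alternative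
-- what changed: Replaced A's per-index inner while-scan for the next non-'A' character by a single backward precomputation pass (next-non-A array) followed by one forward minimum pass; asymptotically O(n) vs A's worst-case O(n^2) on 'A'-heavy names, but not measurably faster on the random timing inputs.
import Mathlib
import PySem

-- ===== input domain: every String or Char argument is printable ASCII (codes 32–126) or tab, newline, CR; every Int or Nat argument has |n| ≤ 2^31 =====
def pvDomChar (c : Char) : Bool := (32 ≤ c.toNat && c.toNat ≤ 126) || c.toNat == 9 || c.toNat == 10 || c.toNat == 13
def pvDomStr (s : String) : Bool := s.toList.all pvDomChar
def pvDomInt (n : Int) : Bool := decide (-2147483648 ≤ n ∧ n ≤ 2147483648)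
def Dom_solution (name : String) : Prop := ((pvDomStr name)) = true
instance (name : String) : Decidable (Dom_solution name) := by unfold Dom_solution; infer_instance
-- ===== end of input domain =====

-- B replaces A's per-index inner while-scan for the next non-'A' character by a single
-- backward precomputation pass building a next-non-'A' array (objective: alternative).

-- ===== PORT A =====
-- A's inner `while check < len(name) and name[check] == 'A': check += 1`
def solWhile (s : List Char) (check : Int) : Int :=
  if h : check < PySem.List.len s ∧ PySem.List.pyGetD s check ' ' = 'A' then
    solWhile s (check + 1)
  else check
termination_by (PySem.List.len s - check).toNat
decreasing_by simp only [PySem.List.len_eq] at *; omega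

def solution (name : String) : Int :=
  (name.toList.foldl (fun a c => a + min ((c.toNat : Int) - 65) (91 - (c.toNat : Int))) 0)
  + (PySem.List.enumerate name.toList).foldl
      (fun mv p =>
        min (min (p.1 * 2 + PySem.List.len name.toList - solWhile name.toList (p.1 + 1))
                 (p.1 + 2 * (PySem.List.len name.toList - solWhile name.toList (p.1 + 1)))) mv)
      1000000000

-- ===== PORT B =====
-- B's backward pass `for i in range(n-1, -1, -1): nxt[i] = run; if name[i] != 'A': run = i`,
-- written as structural recursion on the number k of trailing positions already filled:
-- (bNxt s k).1 is nxt[n-k .. n-1] and (bNxt s k).2 is the current `run`.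
def bNxt (s : List Char) : Nat → List Int × Int
  | 0 => ([], PySem.List.len s)
  | k + 1 =>
    let p := bNxt s k
    let i : Nat := s.length - (k + 1)
    (p.2 :: p.1, if s.getD i ' ' ≠ 'A' then (i : Int) else p.2)

def solution_alt (name : String) : Int :=
  (name.toList.map (fun c => min ((c.toNat : Int) - 65) (91 - (c.toNat : Int)))).sum
  + (PySem.List.enumerate (bNxt name.toList name.toList.length).1).foldl
      (fun mv p =>
        min (min mv (2 * p.1 + PySem.List.len name.toList - p.2))
            (p.1 + 2 * (PySem.List.len name.toList - p.2)))
      (10 ^ 9)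

-- ===== PRECONDITION & SPEC =====
def Spec_solution (name : String) (out : Int) : Prop := out = solution_alt name
instance (name : String) (out : Int) : Decidable (Spec_solution name out) := by unfold Spec_solution; infer_instance

-- ===== CLAIM (what is proved, stated in full; the proofs are below) =====
def Claim_equal_solution : Prop := ∀ (name : String), Dom_solution name → Spec_solution name (solution name)

-- ===== LEMMAS AND PROOFS =====

-- solWhile at a natural-number index
def swN (s : List Char) (i : Nat) : Int := solWhile s (i : Int)

theorem swN_len (s : List Char) : swN s s.length = (s.length : Int) := by
  unfold swN
  rw [solWhile]
  simp

theorem swN_step (s : List Char) (i : Nat) (h : i < s.length) :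
    swN s i = if s.getD i ' ' = 'A' then swN s (i + 1) else (i : Int) := by
  unfold swN
  rw [solWhile]
  simp only [PySem.List.len_eq, PySem.List.pyGetD_natCast]
  split_ifs with h1 h2 h2 <;> push_cast <;> first
    | rfl
    | (exact absurd ⟨by exact_mod_cast h, h2⟩ h1)
    | (exact absurd h1.2 h2)

theorem bNxt_spec (s : List Char) : ∀ k, k ≤ s.length →
    bNxt s k = ((List.range k).map (fun t => swN s (s.length - k + t + 1)),
                swN s (s.length - k)) := by
  intro k
  induction k with
  | zero =>
    intro _
    simp [bNxt, PySem.List.len_eq, swN_len]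
  | succ k ih =>
    intro hk
    have hk' : k ≤ s.length := by omega
    rw [bNxt, ih hk']
    dsimp only
    rw [Prod.mk.injEq]
    constructor
    · -- lists
      rw [List.range_succ_eq_map, List.map_cons, List.map_map]
      have hhd : s.length - (k + 1) + 0 + 1 = s.length - k := by omega
      rw [hhd]
      congr 1
      apply List.map_congr_left
      intro t _
      simp only [Function.comp]
      congr 2
      omega
    · -- run value
      have hi : s.length - (k + 1) < s.length := by omega
      rw [swN_step s _ hi]
      have h1 : s.length - (k + 1) + 1 = s.length - k := by omega
      rw [h1]
      by_cases hA : s.getD (s.length - (k + 1)) ' ' = 'A'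
      · simp only [hA, ne_eq, not_true_eq_false, if_false, if_true]
      · simp only [ne_eq, hA, not_false_eq_true, if_true, if_false]

theorem nxt_eq (s : List Char) :
    (bNxt s s.length).1 = (List.range s.length).map (fun t => swN s (t + 1)) := by
  rw [bNxt_spec s s.length le_rfl]
  simp

theorem minloop_eq (s : List Char) :
    (PySem.List.enumerate s).foldl
      (fun mv p =>
        min (min (p.1 * 2 + PySem.List.len s - solWhile s (p.1 + 1))
                 (p.1 + 2 * (PySem.List.len s - solWhile s (p.1 + 1)))) mv)
      1000000000
    = (PySem.List.enumerate (bNxt s s.length).1).foldl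
      (fun mv p =>
        min (min mv (2 * p.1 + PySem.List.len s - p.2))
            (p.1 + 2 * (PySem.List.len s - p.2)))
      (10 ^ 9) := by
  rw [PySem.List.enumerate_eq_map_pyRange s ' ', PySem.List.enumerate_eq_map_pyRange _ 0,
      nxt_eq, List.foldl_map, List.foldl_map]
  have hlen : PySem.List.len ((List.range s.length).map (fun t => swN s (t + 1)))
      = PySem.List.len s := by
    simp [PySem.List.len_eq]
  rw [hlen]
  have h9 : (10 : Int) ^ 9 = 1000000000 := by norm_num
  rw [h9]
  apply PySem.List.foldl_congr_mem
  intro mv j hj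
  dsimp only
  have hj' : 0 ≤ j ∧ j < (s.length : Int) := by
    have := (PySem.List.mem_pyRange_one).1 (by simpa [PySem.List.len_eq] using hj)
    simpa [PySem.List.len_eq] using this
  have hget : PySem.List.pyGetD ((List.range s.length).map (fun t => swN s (t + 1))) j 0
      = swN s (j.toNat + 1) := by
    rw [PySem.List.pyGetD_eq_getElem _ 0 hj'.1 (by simp; omega)]
    simp [List.getElem_map]
  have hcast : ((j.toNat : Int)) = j := Int.toNat_of_nonneg hj'.1
  have harg : swN s (j.toNat + 1) = solWhile s (j + 1) := by
    unfold swN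
    push_cast [hcast]
    rfl
  rw [hget, harg]
  simp only [PySem.List.len_eq]
  omega

-- ===== VERDICT (by name: the statement is the Claim_ definition above) =====
theorem solution_spec : Claim_equal_solution := by
  intro name _
  unfold Spec_solution solution solution_alt
  rw [PySem.List.foldl_add, minloop_eq]
  simp
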